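/- GENERATED by mk_final_copies.py from the proof of the farm's unit `vorbis_decode_packet_rest.4b` (farm:vorbis_decode_packet_rest.4b.1: Lemmas.lean) as the
   re-elaboration sweep compiled it — do not edit. -/
import Asan.CheckWalk
import Vorbis.Spec.Units.vorbis_decode_packet_rest_4b

open X86 X86.User Asan Vorbis Vorbis.Spec Vorbis.Spec.vorbis_decode_packet_rest

set_option maxRecDepth 4000
set_option maxHeartbeats 4000000

namespace Vorbis.Spec.vorbis_decode_packet_rest_4b

/-- `movsx rbx, bx ; imul rbx, rbx, 0x848 ; add rbx, [rbp + 0xa8]` with `bx = book`, bit 15 clear: `f->codebooks + book`. -/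
theorem book_addr (b cb : Nat) (hb : b < 32768) (hcb : cb + 2120 * b < 2 ^ 64) :
    (Word.ofBV (BitVec.signExtend 64 (Word.part .w16 (UInt64.ofNat b))) * 2120 + UInt64.ofNat cb).toNat = cb + 2120 * b := by
  have e1 : (Word.part .w16 (UInt64.ofNat b)).toNat = b := by
    unfold Word.part
    simp only [Width.bits, BitVec.toNat_setWidth, UInt64.toNat_toBitVec, UInt64.toNat_ofNat']
    omega
  have e2 : (Word.part .w16 (UInt64.ofNat b)).toInt = (b : Int) := by
    rw [BitVec.toInt_eq_toNat_cond, e1]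
    have : 2 * b < 2 ^ 16 := by omega
    simp only [this, if_true]
  have e3 : (2120 : Word).toNat = 2120 := rfl
  rw [ofBV_signExtend64, e2, word_nonneg _ (Int.natCast_nonneg _), Int.toNat_natCast]
  unfold addr
  rw [UInt64.toNat_add, UInt64.toNat_mul, e3, UInt64.toNat_ofNat', UInt64.toNat_ofNat']
  omega


/-- **Sub-segment B, PROVED**: 0x110d5c–0x110d8d + 0x110c92–0x110c9a, `c = f->codebooks + book`, the optional call
of prep_huffman (its precondition from `DecodeInv.readerEnv`, `Reader.bits_of_window` and the frame's shadow layer; its footprint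
through `Loop4.step'`). -/
theorem segB {Lay : Layout} (hLay : Lay.hi = 0x1000000) {μ : Microarch} (hμ : UserX.MicroOK μ) {u₀ : State}
    (hcode : HasCodeNat Lay u₀ Vorbis.L.vorbis_decode_packet_rest.entry Vorbis.Code.code_vorbis_decode_packet_rest.nat Vorbis.L.vorbis_decode_packet_rest.size)
    (h_prep : ∀ (others : List Obj) (frames : List (Nat × FrameLayout)) (Blk : Block → Prop) (len : Nat), Calls Lay μ Vorbis.WayInv (Vorbis.conv u₀) Vorbis.L.prep_huffman.entry (Vorbis.Spec.prep_huffman.spec others frames Blk len))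
    (hl8 : Asan.SmallCheck Lay μ Vorbis.WayInv (Vorbis.CodeOK u₀) [.rax, .rcx, .rdx] 8 Vorbis.L.__asan_load8_noabort.entry)
    (hl4 : Asan.SmallCheck Lay μ Vorbis.WayInv (Vorbis.CodeOK u₀) [.rax, .rcx, .rdx] 4 Vorbis.L.__asan_load4_noabort.entry) :
    Seg4b Lay μ u₀ := by
  intro others frames len Ar stored room mode ysz e ret i j k b v hat
  have he := hat.entry
  v_entry he
  have w_rip := hat.rip
  have w_rsp : v.reg .rsp = e.reg .rsp - 3000 := hat.rsp
  have hrsp_v : v.reg .rsp = e.reg .rsp - 3000 := hat.rsp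
  have w_eq : Mem.EqOn Vorbis.L.textLo Vorbis.L.textHi u₀.mem v.mem := hat.code
  have hdf : v.flags .df = false := (show abiInv _ from hat.abi).1
  have hmx : v.mxcsr &&& 0x1F80 = 0x1F80 := (show abiInv _ from hat.abi).2
  have hsse := Vorbis.sseOK_of_abiInv hat.abi
  have hprep := h_prep others (framesIn frames e) (RunBlk Ar len) len
  obtain ⟨hsh, hinv0, hargs⟩ := hat.pre
  have hinv := hat.inv
  have hok := hinv.ok
  have hL := hinv.live
  have hbits := hinv.fb.vorbis.bits
  obtain ⟨f, hf⟩ : ∃ f : Nat, fOf e = f := ⟨_, rfl⟩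
  rw [hf] at hinv hbits
  have hrbp : v.reg .rbp = addr f := eq_addr _ _ (by rw [hat.rbp, hf])
  have hrbx : v.reg .rbx = UInt64.ofNat b := hat.rbx
  have hfoff := hinv.objOff
  have hfr := hbits.OBR
  simp only [voff] at hfoff hfr
  have hfw : f + 1808 ≤ 0xC00000 ∧ (f + 1808 ≤ 0x700000 ∨ 0x800000 ≤ f) := ⟨hfr.2, hfoff⟩
  clear hfoff
  have ra8 : v.mem.readLE (addr f + 0xa8) 8 = stb_vorbis.codebooks v.mem f := by simp only [vfield, vacc, voff]
  have hfn : (addr f).toNat = f := toNat_addr f (by omega)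
  have hblt : (b : Int) < stb_vorbis.codebook_count v.mem f := by
    rw [← hf]
    exact hat.book_lt
  have hcbin := hinv.config.cb0.cb_in b hblt
  have hcbok := hok.inside _ (hinv.config.reads_blk ConfigOK.Reads.codebooks)
  have ecb0 : stb_vorbis.codebooks v.mem f = v.mem.u64 (f + 168) := by simp only [vacc, voff]
  simp only [vblock, vacc, voff] at hcbin hcbok
  rw [← ecb0] at hcbin hcbok
  u_walk hcode [hμ.vendor] until [Vorbis.L.vorbis_decode_packet_rest.at_110d93] span [Vorbis.L.textLo, Vorbis.L.textHi] side (v_side)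
  · -- 0x110d63: load8 f + 0xa8 (`f->codebooks`)
    have hun : ShadowUntouched v.mem s_110d63.mem := by v_untouched
    exact check_site hat.shadow hun (hbits.site_field hL 168 8 (by omega) (by omega) rfl) (by u_omega)
  · -- 0x110d81: load4 f + 0x6e8 (`f->valid_bits`)
    have hun : ShadowUntouched v.mem s_110d81.mem := by v_untouched
    exact check_site hat.shadow hun (hbits.site_field hL 1768 4 (by omega) (by omega) rfl) (by u_omega)
  · v_inv
  · -- prep_huffman's precondition
    have hun : ShadowUntouched v.mem s_110c95.mem := by v_untouched
    have hsame : Mem.SameExcept [⟨(e.reg .rsp).toNat - 3856, (e.reg .rsp).toNat - 3000⟩] v.mem s_110c95.mem := by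
      u_same
    have e1 : (s_110c95.reg .rsp).toNat + 8 = (spOf e).toNat := by
      rw [w_rsp]
      u_omega
    have erdi : (s_110c95.reg .rdi).toNat = f := by rw [w_rdi, hfn]
    refine ⟨⟨?_, hsh.offText⟩, ?_, ?_⟩
    · rw [e1]
      exact hat.shadow.untouched hun
    · rw [erdi]
      exact hinv.readerEnv
    · rw [erdi]
      exact Reader.bits_of_window hbits hsame (by omega)
  · -- after prep_huffman
    have c_rdi : (s_110c95.reg .rdi).toNat = f := by rw [w_rdi_110c95, hfn]
    have hpost : PrepHuffmanPost (RunBlk Ar len) len f s_110c95 s_110c95r := by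
      rw [← c_rdi]
      exact w_post
    v_after_call w_rsp_110c95 w_mem_110c95
    simp only [c_rdi] at w_same
    -- the slot the round still needs, through the callee's footprint
    have hso : s_110c95r.mem.readLE (e.reg .rsp - 3000 + 0x8) 4 = slot32 e v 0x8 := by
      have h0 : v.mem.readLE (e.reg .rsp - 3000 + 0x8) 4 = slot32 e v 0x8 := rfl
      u_frame h0
    have hsame : Mem.SameExcept [⟨(e.reg .rsp).toNat - 3856, (e.reg .rsp).toNat - 3000 + 12⟩,
        ⟨f + 48, f + 56⟩, ⟨f + 84, f + 96⟩, ⟨f + 136, f + 144⟩, ⟨f + 1484, f + 1749⟩,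
        ⟨f + 1752, f + 1784⟩,
        ⟨stb_vorbis.finalY v.mem f i, stb_vorbis.finalY v.mem f i + ysz i⟩] v.mem s_110c95r.mem := by
      u_same
    have hb : Bits (RunBlk Ar len) len s_110c95r.mem f := hpost.reader.bits
    u_walk hcode [hμ.vendor] until [Vorbis.L.vorbis_decode_packet_rest.at_110d93] span [Vorbis.L.textLo, Vorbis.L.textHi] side (v_side)
    refine ReachVia.done ?_
    have hst := hat.toLoop4.step' (k' := k) he_room he_top w_rsp w_eq (by show (Vorbis.conv u₀).inv _; v_inv)
      (by rw [w_kept .rbp rfl]; exact hat.rbp)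
      (by rw [w_kept .r14 rfl]; exact hat.r14) hat.k_le
      (by rw [hf, w_mem]; exact hsame)
      (by
        show s_110c9a.mem.readLE (e.reg .rsp - 3000 + 0x8) 4 = _
        rw [w_mem, hso]
        exact hat.slot_offset)
      (by rw [hf, w_mem]; exact hb)
    obtain ⟨hbody, ecb, ecc, ecd⟩ := hst
    refine ⟨hbody, w_rip, by rw [ecd]; exact hat.k_lt, ?_, by rw [ecc]; exact hat.book_lt⟩
    unfold stb_vorbis.codebooks_at
    rw [ecb, w_rbx, hf]
    simp only [voff]
    exact book_addr b _ hat.b_lt (by omega)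
  · -- `valid_bits > 9`: no call
    refine ReachVia.done ?_
    have hsame : Mem.SameExcept [⟨(e.reg .rsp).toNat - 3856, (e.reg .rsp).toNat - 3000⟩] v.mem s_110d8d.mem := by
      u_same
    obtain ⟨hbody, ecb, ecc, ecd⟩ := hat.toLoop4.stackOnly' he_room he_top w_rsp w_eq
      (by show (Vorbis.conv u₀).inv _; v_inv) (w_kept.get .rbp rfl) (w_kept.get .r14 rfl) hsame
    refine ⟨hbody, w_rip, by rw [ecd]; exact hat.k_lt, ?_, by rw [ecc]; exact hat.book_lt⟩
    unfold stb_vorbis.codebooks_at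
    rw [ecb, w_rbx, hf]
    simp only [voff]
    exact book_addr b _ hat.b_lt (by omega)

end Vorbis.Spec.vorbis_decode_packet_rest_4b
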